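-- pv_equiv track=rewrite | github.com/Kavya2004/Intellens | backend/utils/workflow_diagram_builder.py | generate_flow_explanations
-- ===== SOURCE A (Python) =====
-- def generate_flow_explanations(languages, services):
--     """Generate detailed explanations for component interactions."""
--     explanations = []
--
--     # User to application interactions
--     if languages:
--         app_list = ", ".join(list(languages.keys())[:3])
--         explanations.append(f"User sends HTTP requests to applications built with {app_list}")
--
--     # Application to service interactions
--     if services:
--         for service in list(services.keys())[:3]:
--             if "aws" in service.lower():
--                 explanations.append(f"Applications authenticate and make API calls to {service}")
--             elif "database" in service.lower() or "postgres" in service.lower() or "mysql" in service.lower():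
--                 explanations.append(f"Applications execute SQL queries and store/retrieve data from {service}")
--             elif "docker" in service.lower():
--                 explanations.append(f"Applications are containerized and deployed using {service}")
--             else:
--                 explanations.append(f"Applications integrate with and consume services from {service}")
--
--     return explanations
-- ===== SOURCE B (Python) =====
-- TEMPLATES = [
--     "Applications authenticate and make API calls to ",
--     "Applications execute SQL queries and store/retrieve data from ",
--     "Applications are containerized and deployed using ",
--     "Applications integrate with and consume services from ",
-- ]
-- # flat keyword -> priority-index map; category of a service = the SMALLEST index
-- # among all matching keywords (min aggregation), default = the last template
-- KEYWORD_PRIORITY = {"aws": 0, "database": 1, "postgres": 1, "mysql": 1, "docker": 2}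
--
--
-- def _explain(svcs):
--     if not svcs:
--         return []
--     s = svcs[0].lower()
--     idx = min((i for k, i in KEYWORD_PRIORITY.items() if k in s),
--               default=len(TEMPLATES) - 1)
--     return [TEMPLATES[idx] + svcs[0]] + _explain(svcs[1:])
--
--
-- def generate_flow_explanations(languages, services):
--     head = []
--     if languages:
--         head = ["User sends HTTP requests to applications built with "
--                 + ", ".join(list(languages)[:3])]
--     return head + _explain(list(services)[:3])
-- ===== Notes on version B (the rewrite author's own statement) =====
-- stated objective: alternative
-- what changed: Replaces the ordered if/elif cascade by min-aggregation over a flat keyword->priority map (category = smallest index among all matching keywords, default last), and builds the per-service texts by structural recursion instead of an imperative append loop.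
import Mathlib
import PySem

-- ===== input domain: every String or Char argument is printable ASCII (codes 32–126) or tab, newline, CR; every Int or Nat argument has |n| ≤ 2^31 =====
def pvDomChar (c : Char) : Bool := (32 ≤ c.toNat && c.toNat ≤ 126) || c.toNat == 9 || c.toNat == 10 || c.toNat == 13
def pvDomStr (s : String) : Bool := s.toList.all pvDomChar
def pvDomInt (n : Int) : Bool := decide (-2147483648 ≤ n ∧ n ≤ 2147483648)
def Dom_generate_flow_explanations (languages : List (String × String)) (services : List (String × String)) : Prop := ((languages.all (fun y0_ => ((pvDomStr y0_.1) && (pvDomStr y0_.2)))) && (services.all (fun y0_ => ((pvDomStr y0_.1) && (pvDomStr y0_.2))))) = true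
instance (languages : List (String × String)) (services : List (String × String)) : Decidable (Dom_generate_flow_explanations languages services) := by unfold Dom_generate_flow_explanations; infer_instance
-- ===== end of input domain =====

-- B classifies each service by MIN-AGGREGATION over a flat keyword→priority map (smallest
-- index among all matching keywords, default = last template) and builds the texts by
-- structural recursion instead of A's ordered if/elif cascade with imperative appends
-- (objective: alternative; same cost).

-- ===== PORT A =====
def generate_flow_explanations (languages : List (String × String)) (services : List (String × String)) : List String :=
  let explanations : List String := []
  let explanations :=
    if languages ≠ [] then
      let app_list := PySem.Str.join ", " ((PySem.List.dedup (languages.map Prod.fst)).take 3)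
      explanations ++ ["User sends HTTP requests to applications built with " ++ app_list]
    else explanations
  if services ≠ [] then
    ((PySem.List.dedup (services.map Prod.fst)).take 3).foldl (fun acc service =>
      acc ++ [ if PySem.Str.isIn "aws" (PySem.Str.lower service) then
                 "Applications authenticate and make API calls to " ++ service
               else if (PySem.Str.isIn "database" (PySem.Str.lower service) ||
                        PySem.Str.isIn "postgres" (PySem.Str.lower service) ||
                        PySem.Str.isIn "mysql" (PySem.Str.lower service)) then
                 "Applications execute SQL queries and store/retrieve data from " ++ service
               else if PySem.Str.isIn "docker" (PySem.Str.lower service) then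
                 "Applications are containerized and deployed using " ++ service
               else
                 "Applications integrate with and consume services from " ++ service ]) explanations
  else explanations

-- ===== PORT B =====
def pvTemplates : List String :=
  [ "Applications authenticate and make API calls to ",
    "Applications execute SQL queries and store/retrieve data from ",
    "Applications are containerized and deployed using ",
    "Applications integrate with and consume services from " ]

def pvKeywordPriority : List (String × Nat) :=
  [("aws", 0), ("database", 1), ("postgres", 1), ("mysql", 1), ("docker", 2)]

-- idx = min((i for k,i in KEYWORD_PRIORITY.items() if k in s), default=len(TEMPLATES)-1)
def pvCategory (s : String) : Nat :=
  match PySem.List.min?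
      (pvKeywordPriority.filterMap (fun p => if PySem.Str.isIn p.1 s then some p.2 else none))
      (fun i => i) with
  | none => pvTemplates.length - 1
  | some i => i

def pvExplain : List String → List String
  | [] => []
  | svc :: rest =>
      (pvTemplates.getD (pvCategory (PySem.Str.lower svc)) "" ++ svc) :: pvExplain rest

def generate_flow_explanations_alt (languages : List (String × String)) (services : List (String × String)) : List String :=
  let head : List String :=
    if languages = [] then []
    else ["User sends HTTP requests to applications built with " ++
          PySem.Str.join ", " ((PySem.List.dedup (languages.map Prod.fst)).take 3)]
  head ++ pvExplain ((PySem.List.dedup (services.map Prod.fst)).take 3)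

-- ===== PRECONDITION & SPEC =====
def Spec_generate_flow_explanations (languages : List (String × String)) (services : List (String × String)) (out : List String) : Prop := out = generate_flow_explanations_alt languages services
instance (languages : List (String × String)) (services : List (String × String)) (out : List String) : Decidable (Spec_generate_flow_explanations languages services out) := by unfold Spec_generate_flow_explanations; infer_instance

-- ===== CLAIM =====
def Claim_equal_generate_flow_explanations : Prop := ∀ (languages : List (String × String)) (services : List (String × String)), Dom_generate_flow_explanations languages services → Spec_generate_flow_explanations languages services (generate_flow_explanations languages services)

-- ===== LEMMAS AND PROOFS =====

/-- A's append-accumulator loop is init ++ map. -/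
theorem pv_foldl_snoc {α β : Type} (f : α → β) :
    ∀ (xs : List α) (init : List β),
      xs.foldl (fun acc x => acc ++ [f x]) init = init ++ xs.map f := by
  intro xs
  induction xs with
  | nil => intro init; simp
  | cons x xs ih => intro init; simp [List.foldl, ih]

/-- B's recursion is a map. -/
theorem pv_explain_map (xs : List String) :
    pvExplain xs = xs.map (fun svc => pvTemplates.getD (pvCategory (PySem.Str.lower svc)) "" ++ svc) := by
  induction xs with
  | nil => rfl
  | cons x xs ih => simp [pvExplain, ih]

/-- A's if/elif cascade equals B's min-aggregated category lookup. -/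
theorem pv_rule_eq (service : String) :
    (if PySem.Str.isIn "aws" (PySem.Str.lower service) then
       "Applications authenticate and make API calls to " ++ service
     else if (PySem.Str.isIn "database" (PySem.Str.lower service) ||
              PySem.Str.isIn "postgres" (PySem.Str.lower service) ||
              PySem.Str.isIn "mysql" (PySem.Str.lower service)) then
       "Applications execute SQL queries and store/retrieve data from " ++ service
     else if PySem.Str.isIn "docker" (PySem.Str.lower service) then
       "Applications are containerized and deployed using " ++ service
     else
       "Applications integrate with and consume services from " ++ service)
    = pvTemplates.getD (pvCategory (PySem.Str.lower service)) "" ++ service := by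
  by_cases h1 : PySem.Str.isIn "aws" (PySem.Str.lower service) <;>
  by_cases h2 : PySem.Str.isIn "database" (PySem.Str.lower service) <;>
  by_cases h3 : PySem.Str.isIn "postgres" (PySem.Str.lower service) <;>
  by_cases h4 : PySem.Str.isIn "mysql" (PySem.Str.lower service) <;>
  by_cases h5 : PySem.Str.isIn "docker" (PySem.Str.lower service) <;>
  simp [PySem.Str.isIn, PySem.Str.lower] at h1 h2 h3 h4 h5 <;>
  simp [pvCategory, pvKeywordPriority, PySem.Str.isIn, PySem.Str.lower,
        h1, h2, h3, h4, h5, PySem.List.min?, pvTemplates]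

-- ===== VERDICT =====
theorem generate_flow_explanations_spec : Claim_equal_generate_flow_explanations := by
  intro languages services _
  unfold Spec_generate_flow_explanations generate_flow_explanations generate_flow_explanations_alt
  by_cases hs : services = []
  · subst hs
    by_cases hl : languages = [] <;> simp [hl, PySem.List.dedup, pvExplain]
  · have hs' : services ≠ [] := hs
    rw [if_pos hs',
        pv_foldl_snoc (fun service =>
          if PySem.Str.isIn "aws" (PySem.Str.lower service) then
            "Applications authenticate and make API calls to " ++ service
          else if (PySem.Str.isIn "database" (PySem.Str.lower service) ||
                   PySem.Str.isIn "postgres" (PySem.Str.lower service) ||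
                   PySem.Str.isIn "mysql" (PySem.Str.lower service)) then
            "Applications execute SQL queries and store/retrieve data from " ++ service
          else if PySem.Str.isIn "docker" (PySem.Str.lower service) then
            "Applications are containerized and deployed using " ++ service
          else
            "Applications integrate with and consume services from " ++ service),
        funext pv_rule_eq, pv_explain_map]
    by_cases hl : languages = [] <;> simp [hl]
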